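-- pv_equiv track=rewrite | github.com/mikekestemont/Midas | code/Levenshtein_suggester.py | sort_candidates
-- ===== SOURCE A (Python) =====
-- from operator import itemgetter
--
-- def sort_candidates(candidates, lemma_freqs):
--     """
--     Returns a list: [candidates sorted on the basis of their the edit dist,
--                             majority lemma for the closest item (for evaluation purposes),
--                             list of suggested lemmas]
--     """
--     freq_ranking = [] # a ranking of the suggested lemma based on their training freq
--     candidates = sorted(candidates, key=itemgetter(2), reverse=True)
--     lev_suggested_lemmas = set()
--     for train_token, train_lemmas, dist in candidates:
--         for lemma in train_lemmas:
--             lev_suggested_lemmas.add(lemma)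
--             try:
--                 freq_ranking.append((lemma, lemma_freqs[lemma]))
--             except KeyError:
--                 pass
--     freq_ranking = sorted(freq_ranking, key=itemgetter(1), reverse=True)
--     majority_lemma_closest_lev_token = freq_ranking[0][0]
--     return (candidates, majority_lemma_closest_lev_token, lev_suggested_lemmas)
-- ===== SOURCE B (Python) =====
-- def sort_candidates(candidates, lemma_freqs):
--     """Staged pipeline instead of A's incremental loops: flatten all lemmas of the
--     sorted candidates once, then build the set, take max() of the known frequencies
--     and scan for the first lemma attaining it (no freq_ranking list, no second sort)."""
--     candidates = sorted(candidates, key=lambda c: c[2], reverse=True)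
--     flat = [lem for _tok, lemmas, _d in candidates for lem in lemmas]
--     suggested = set(flat)
--     known = [lem for lem in flat if lem in lemma_freqs]
--     best_freq = max(lemma_freqs[lem] for lem in known)
--     best = next(lem for lem in known if lemma_freqs[lem] == best_freq)
--     return (candidates, best, suggested)
-- ===== Notes on version B (the rewrite author's own statement) =====
-- stated objective: simpler
-- what changed: A interleaves set-building and (lemma, freq) appends inside nested loops and then stably sorts the ranking list to take its head; B is a staged pipeline: flatten the lemmas once, set() the flat list, take max() of the known frequencies and scan for the first lemma attaining it, so the ranking list and its sort disappear.
import Mathlib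
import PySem

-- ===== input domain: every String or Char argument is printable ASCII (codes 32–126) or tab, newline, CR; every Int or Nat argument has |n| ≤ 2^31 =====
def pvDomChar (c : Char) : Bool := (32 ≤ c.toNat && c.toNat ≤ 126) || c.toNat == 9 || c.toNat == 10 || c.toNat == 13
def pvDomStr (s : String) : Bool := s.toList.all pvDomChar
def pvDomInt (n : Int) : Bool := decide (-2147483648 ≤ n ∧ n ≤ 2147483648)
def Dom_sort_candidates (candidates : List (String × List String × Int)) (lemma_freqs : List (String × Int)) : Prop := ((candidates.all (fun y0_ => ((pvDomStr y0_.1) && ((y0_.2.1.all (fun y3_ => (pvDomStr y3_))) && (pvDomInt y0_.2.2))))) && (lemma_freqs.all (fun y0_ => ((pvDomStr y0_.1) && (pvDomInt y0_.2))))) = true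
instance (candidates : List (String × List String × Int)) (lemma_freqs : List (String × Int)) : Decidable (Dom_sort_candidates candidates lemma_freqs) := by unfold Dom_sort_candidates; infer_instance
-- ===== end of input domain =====

-- B replaces A's interleaved loops (set.add + freq_ranking.append, then a second sort)
-- by a staged pipeline: flatten, set(), max() of the known frequencies, first-match scan
-- (objective: simpler).

-- ===== PORT A =====
-- the inner 'for lemma in train_lemmas' loop of A: grows the suggested-lemma set and appends
-- (lemma, freq) to freq_ranking when the dict lookup succeeds (try/except KeyError → Option match)
def pvAInner (lemma_freqs : List (String × Int)) (acc : PySem.Set String × List (String × Int)) (lem : String) : PySem.Set String × List (String × Int) :=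
  let s := PySem.Set.add acc.1 lem
  match PySem.Dict.get? (PySem.Dict.mk lemma_freqs) lem with
  | some f => (s, acc.2 ++ [(lem, f)])
  | none => (s, acc.2)

def sort_candidates (candidates : List (String × List String × Int)) (lemma_freqs : List (String × Int)) : (List (String × List String × Int)) × String × List String :=
  let cands := PySem.List.sorted candidates (fun c => c.2.2) true
  let st := cands.foldl (fun acc c => c.2.1.foldl (pvAInner lemma_freqs) acc) (PySem.Set.empty, [])
  let freq_ranking := PySem.List.sorted st.2 (fun p => p.2) true
  match freq_ranking with
  | [] => (cands, "", st.1)          -- unreachable under Pre_: Python A raises IndexError here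
  | p :: _ => (cands, p.1, st.1)

-- ===== PORT B =====
def sort_candidates_alt (candidates : List (String × List String × Int)) (lemma_freqs : List (String × Int)) : (List (String × List String × Int)) × String × List String :=
  let cands := PySem.List.sorted candidates (fun c => c.2.2) true
  let flat := cands.flatMap (fun c => c.2.1)
  let suggested := PySem.Set.ofList flat
  let known := flat.filter (fun lem => (PySem.Dict.get? (PySem.Dict.mk lemma_freqs) lem).isSome)
  -- lemma_freqs[lem] for lem ∈ known is a successful lookup, hence getD with any default is exact
  let best :=
    match PySem.List.max? (known.map (fun lem => PySem.Dict.getD (PySem.Dict.mk lemma_freqs) lem 0)) (fun x => x) with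
    | none => ""                     -- unreachable under Pre_: Python B raises ValueError (max of empty) here
    | some m =>
      match known.find? (fun lem => PySem.Dict.getD (PySem.Dict.mk lemma_freqs) lem 0 == m) with
      | none => ""                   -- unreachable: the first extremal element is found
      | some lem => lem
  (cands, best, suggested)

-- ===== PRECONDITION & SPEC =====
-- Pre_ excludes exactly the inputs on which Python A raises IndexError (freq_ranking stays
-- empty) — B raises ValueError there: some candidate must carry a lemma that is a key of lemma_freqs.
def Pre_sort_candidates (candidates : List (String × List String × Int)) (lemma_freqs : List (String × Int)) : Prop :=
  candidates.any (fun c => c.2.1.any (fun lem => (PySem.Dict.get? (PySem.Dict.mk lemma_freqs) lem).isSome)) = true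
instance (candidates : List (String × List String × Int)) (lemma_freqs : List (String × Int)) : Decidable (Pre_sort_candidates candidates lemma_freqs) := by unfold Pre_sort_candidates; infer_instance

def pvWitness_sort_candidates : (List (String × List String × Int)) × (List (String × Int)) :=
  ([("abc", ["x", "y"], 2), ("ad", ["y"], 1)], [("x", 3), ("y", 5)])

def Spec_sort_candidates (candidates : List (String × List String × Int)) (lemma_freqs : List (String × Int)) (out : (List (String × List String × Int)) × String × List String) : Prop := out = sort_candidates_alt candidates lemma_freqs
instance (candidates : List (String × List String × Int)) (lemma_freqs : List (String × Int)) (out : (List (String × List String × Int)) × String × List String) : Decidable (Spec_sort_candidates candidates lemma_freqs out) := by unfold Spec_sort_candidates; infer_instance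

-- ===== CLAIM (what is proved, stated in full; the proofs are below) =====
def Claim_equal_sort_candidates : Prop := ∀ (candidates : List (String × List String × Int)) (lemma_freqs : List (String × Int)), Dom_sort_candidates candidates lemma_freqs → Pre_sort_candidates candidates lemma_freqs → Spec_sort_candidates candidates lemma_freqs (sort_candidates candidates lemma_freqs)

-- ===== LEMMAS AND PROOFS =====

-- 'first element attaining the maximal second component', recursively from the right
def pvFirstMax : List (String × Int) → Option (String × Int)
  | [] => none
  | p :: t =>
    match pvFirstMax t with
    | none => some p
    | some q => if q.2 ≤ p.2 then some p else some q

-- one step of a running strict max (mirrors reverse stable insertion at the head)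
def pvBest (best : Option (String × Int)) (p : String × Int) : Option (String × Int) :=
  match best with
  | none => some p
  | some b => if b.2 < p.2 then some p else some b

-- A's inner loop over a lemma list, flattened: set grows by Set.add, ranking extends by the hits
theorem pvAInner_foldl (lemma_freqs : List (String × Int)) (L : List String)
    (s : PySem.Set String) (fr : List (String × Int)) :
    L.foldl (pvAInner lemma_freqs) (s, fr)
      = (L.foldl PySem.Set.add s,
         fr ++ (L.filter (fun lem => (PySem.Dict.get? (PySem.Dict.mk lemma_freqs) lem).isSome)).map
                 (fun lem => (lem, PySem.Dict.getD (PySem.Dict.mk lemma_freqs) lem 0))) := by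
  induction L generalizing s fr with
  | nil => simp
  | cons lem t ih =>
      simp only [List.foldl_cons, List.filter_cons]
      cases h : PySem.Dict.get? (PySem.Dict.mk lemma_freqs) lem with
      | none => simp [pvAInner, h, ih]
      | some f =>
          have hg : PySem.Dict.getD (PySem.Dict.mk lemma_freqs) lem 0 = f := by
            simp [PySem.Dict.getD_eq_get?_getD, h]
          simp [pvAInner, h, ih, hg]

-- A's full nested loop over the candidates = the inner characterisation over the flattened lemmas
theorem pvAOuter_foldl (lemma_freqs : List (String × Int)) (cs : List (String × List String × Int)) :
    cs.foldl (fun acc c => c.2.1.foldl (pvAInner lemma_freqs) acc) (PySem.Set.empty, [])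
      = ((cs.flatMap (fun c => c.2.1)).foldl PySem.Set.add PySem.Set.empty,
         ((cs.flatMap (fun c => c.2.1)).filter (fun lem => (PySem.Dict.get? (PySem.Dict.mk lemma_freqs) lem).isSome)).map
            (fun lem => (lem, PySem.Dict.getD (PySem.Dict.mk lemma_freqs) lem 0))) := by
  suffices h : ∀ (cs : List (String × List String × Int)) (s : PySem.Set String) (fr : List (String × Int)),
      cs.foldl (fun acc c => c.2.1.foldl (pvAInner lemma_freqs) acc) (s, fr)
        = ((cs.flatMap (fun c => c.2.1)).foldl PySem.Set.add s,
           fr ++ ((cs.flatMap (fun c => c.2.1)).filter (fun lem => (PySem.Dict.get? (PySem.Dict.mk lemma_freqs) lem).isSome)).map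
              (fun lem => (lem, PySem.Dict.getD (PySem.Dict.mk lemma_freqs) lem 0))) by
    simpa using h cs PySem.Set.empty []
  intro cs
  induction cs with
  | nil => intro s fr; simp
  | cons c t ih =>
      intro s fr
      simp only [List.foldl_cons, pvAInner_foldl, ih, List.flatMap_cons, List.foldl_append,
        List.filter_append, List.map_append, List.append_assoc]

-- the head of a reverse stable insertion step is exactly one pvBest update
theorem head_insertBy_rev (s : List (String × Int)) (x : String × Int) :
    (PySem.List.insertBy (fun a b => decide (b.2 < a.2)) x s).head? = pvBest s.head? x := by
  cases s with
  | nil => simp [PySem.List.insertBy, pvBest]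
  | cons y ys => by_cases h : y.2 < x.2 <;> simp [PySem.List.insertBy, pvBest, h]

-- head of the reverse-sorted list = running strict max (first maximal element wins in both)
theorem head_sorted_rev (R : List (String × Int)) :
    (PySem.List.sorted R (fun p => p.2) true).head? = R.foldl pvBest none := by
  rw [PySem.List.sorted_rev_eq_foldl_insertBy]
  suffices h : ∀ (R : List (String × Int)) (acc : List (String × Int)),
      (R.foldl (fun acc x => PySem.List.insertBy (fun a b => decide ((fun p => p.2) b < (fun p => p.2) a)) x acc) acc).head?
        = R.foldl pvBest acc.head? by
    simpa using h R []
  intro R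
  induction R with
  | nil => intro acc; simp
  | cons x t ih => intro acc; simp only [List.foldl_cons, ih, head_insertBy_rev]

-- the running strict max computes the first maximal element
theorem foldl_pvBest_eq_firstMax (R : List (String × Int)) :
    R.foldl pvBest none = pvFirstMax R := by
  have key : ∀ (t : List (String × Int)) (b : String × Int),
      t.foldl pvBest (some b)
        = some (match pvFirstMax t with
                | none => b
                | some q => if b.2 < q.2 then q else b) := by
    intro t
    induction t with
    | nil => intro b; simp [pvFirstMax]
    | cons p t ih =>
        intro b
        rw [List.foldl_cons]
        by_cases hbp : b.2 < p.2
        · rw [show pvBest (some b) p = some p by simp [pvBest, hbp]]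
          rw [ih p]
          cases hq : pvFirstMax t with
          | none => simp [pvFirstMax, hq, hbp]
          | some q =>
              simp only [pvFirstMax, hq]
              by_cases h1 : q.2 ≤ p.2
              · simp [h1, show ¬ p.2 < q.2 by omega, hbp]
              · simp [h1, show p.2 < q.2 by omega, show b.2 < q.2 by omega]
        · rw [show pvBest (some b) p = some b by simp [pvBest, hbp]]
          rw [ih b]
          cases hq : pvFirstMax t with
          | none => simp [pvFirstMax, hq, hbp]
          | some q =>
              simp only [pvFirstMax, hq]
              by_cases h1 : q.2 ≤ p.2
              · simp [h1, hbp, show ¬ b.2 < q.2 by omega]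
              · simp [h1]
  cases R with
  | nil => simp [pvFirstMax]
  | cons p t =>
      simp only [List.foldl_cons, pvBest, key, pvFirstMax]
      cases hq : pvFirstMax t with
      | none => simp
      | some q =>
          by_cases h : q.2 ≤ p.2
          · have : ¬ p.2 < q.2 := by omega
            simp [h, this]
          · have : p.2 < q.2 := by omega
            simp [h, this]

-- a running max absorbs a larger start: foldl max (max a b) = max a (foldl max b)
theorem foldl_max_shift (l : List Int) : ∀ (a b : Int),
    l.foldl max (max a b) = max a (l.foldl max b) := by
  induction l with
  | nil => intro a b; simp
  | cons c t ih => intro a b; simp only [List.foldl_cons, max_assoc, ih]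

-- B's max-then-first-match selection computes pvFirstMax of the paired list
theorem foldl_max_map (v : String → Int) : ∀ (l : List String) (a : Int),
    (l.map v).foldl max a = l.foldl (fun a b => max a (v b)) a := by
  intro l
  induction l with
  | nil => intro a; simp
  | cons w t ih => intro a; simp only [List.map_cons, List.foldl_cons, ih]

-- B's max-then-first-match selection computes pvFirstMax of the paired list
theorem pvBsel_eq_firstMax (v : String → Int) (K : List String) :
    (match PySem.List.max? (K.map v) (fun x => x) with
     | none => none
     | some m => (K.find? (fun lem => v lem == m)).map (fun lem => (lem, v lem)))
      = pvFirstMax (K.map (fun lem => (lem, v lem))) := by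
  induction K with
  | nil =>
      rw [show PySem.List.max? (([] : List String).map v) (fun x => x) = none by
        simp [PySem.List.max?]]
      simp [pvFirstMax]
  | cons k t ih =>
      rw [List.map_cons, PySem.List.max?_id_cons]
      cases t with
      | nil => simp [pvFirstMax]
      | cons u t' =>
          rw [List.map_cons, PySem.List.max?_id_cons] at ih
          simp only [List.map_cons, List.foldl_cons, foldl_max_map] at *
          set mt : Int := t'.foldl (fun a b => max a (v b)) (v u) with hmt
          have hM : (t'.map v).foldl max (max (v k) (v u)) = max (v k) mt := by
            rw [foldl_max_shift, foldl_max_map]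
          rw [foldl_max_map] at hM
          rw [hM]
          have hcons : pvFirstMax ((k, v k) :: (u, v u) :: List.map (fun lem => (lem, v lem)) t')
              = match pvFirstMax ((u, v u) :: List.map (fun lem => (lem, v lem)) t') with
                | none => some (k, v k)
                | some q => if q.2 ≤ v k then some (k, v k) else some q := rfl
          rw [hcons, ← ih]
          cases hf : (u :: t').find? (fun lem => v lem == mt) with
          | none =>
              exfalso
              have hmem : mt ∈ (u :: t').map v := by
                have h0 := PySem.List.foldl_max_mem (t'.map v) (v u)
                rw [foldl_max_map, ← hmt] at h0
                rcases h0 with h | h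
                · exact h ▸ List.mem_map_of_mem (List.mem_cons_self ..)
                · rcases List.mem_map.mp h with ⟨w, hw, hvw⟩
                  exact List.mem_map.mpr ⟨w, List.mem_cons_of_mem _ hw, hvw⟩
              rcases List.mem_map.mp hmem with ⟨l0, hl0, hv0⟩
              have := List.find?_eq_none.mp hf l0 hl0
              simp [hv0] at this
          | some l0 =>
              have hv0 : v l0 = mt := by
                have := List.find?_some hf
                simpa using this
              by_cases hk : mt ≤ v k
              · have hMk : max (v k) mt = v k := by omega
                simp [hv0, hk]
              · have hMk : max (v k) mt = mt := by omega
                have hkne : (v k == mt) = false := by simp; omega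
                simp [hMk, hkne, hf, hv0]
                exact fun h => absurd h hk

-- ===== VERDICT (by name: the statement is the Claim_ definition above) =====
theorem sort_candidates_spec : Claim_equal_sort_candidates := by
  intro candidates lemma_freqs _ _
  unfold Spec_sort_candidates
  simp only [sort_candidates, sort_candidates_alt]
  rw [pvAOuter_foldl]
  dsimp only
  set cands := PySem.List.sorted candidates (fun c => c.2.2) true with hcands
  set flat := cands.flatMap (fun c => c.2.1) with hflat
  set known := flat.filter (fun lem => (PySem.Dict.get? (PySem.Dict.mk lemma_freqs) lem).isSome) with hknown
  have hset : flat.foldl PySem.Set.add PySem.Set.empty = PySem.Set.ofList flat := by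
    rw [PySem.Set.ofList_eq_foldl]; rfl
  have hhead : (PySem.List.sorted (known.map (fun lem => (lem, PySem.Dict.getD (PySem.Dict.mk lemma_freqs) lem 0))) (fun p => p.2) true).head?
      = (match PySem.List.max? (known.map (fun lem => PySem.Dict.getD (PySem.Dict.mk lemma_freqs) lem 0)) (fun x => x) with
         | none => none
         | some m => (known.find? (fun lem => PySem.Dict.getD (PySem.Dict.mk lemma_freqs) lem 0 == m)).map
                       (fun lem => (lem, PySem.Dict.getD (PySem.Dict.mk lemma_freqs) lem 0))) := by
    rw [head_sorted_rev, foldl_pvBest_eq_firstMax,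
      ← pvBsel_eq_firstMax (fun lem => PySem.Dict.getD (PySem.Dict.mk lemma_freqs) lem 0) known]
  cases hmx : PySem.List.max? (known.map (fun lem => PySem.Dict.getD (PySem.Dict.mk lemma_freqs) lem 0)) (fun x => x) with
  | none =>
      rw [hmx] at hhead
      dsimp only at hhead
      have hnil := List.head?_eq_none_iff.mp hhead
      rw [hnil, hset]
  | some m =>
      rw [hmx] at hhead
      dsimp only at hhead ⊢
      cases hfd : known.find? (fun lem => PySem.Dict.getD (PySem.Dict.mk lemma_freqs) lem 0 == m) with
      | none =>
          rw [hfd] at hhead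
          simp only [Option.map_none] at hhead
          have hnil := List.head?_eq_none_iff.mp hhead
          rw [hnil, hset]
      | some l0 =>
          rw [hfd] at hhead
          simp only [Option.map_some] at hhead
          cases hs : PySem.List.sorted (known.map (fun lem => (lem, PySem.Dict.getD (PySem.Dict.mk lemma_freqs) lem 0))) (fun p => p.2) true with
          | nil => rw [hs] at hhead; simp at hhead
          | cons p tl =>
              rw [hs] at hhead
              simp only [List.head?_cons, Option.some.injEq] at hhead
              rw [hset, hhead]
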